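-- pv_equiv track=rewrite | github.com/apple-mint/algorithm | Programmers/Level 2/기능개발.py | solution
-- ===== SOURCE A (Python) =====
-- from collections import deque
--
-- def solution(progresses, speeds):
--
--     # popleft 메서드 사용 위해 deque로 변환
--     progresses = deque(progresses)
--     speeds = deque(speeds)
--
--     answer = []
--
--     # 모든 기능이 개발되어 배포할 때까지 반복
--     while progresses:
--         cnt = 0
--
--         # 하루에 각 기능의 개발속도에 따라
--         # 얼마나 개발이 진행되었는지를 계산
--         for i in range(len(progresses)):
--             progresses[i] += speeds[i]
--
--         # 만약 배포할 기능이 남아 있고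
--         # 첫번째 기능이 배포할 수 있는 상태라면
--         # cnt에 1를 더해주고 완료된 기능과 해당 기능의 개발속도 제거
--         while progresses and progresses[0] >= 100:
--             cnt += 1
--             progresses.popleft()
--             speeds.popleft()
--
--         # 만약 배포할 기능이 있다면 그 수를 삽입
--         if cnt:
--             answer.append(cnt)
--
--     return answer
-- ===== SOURCE B (Python) =====
-- def solution(progresses, speeds):
--     # one pass: ceil days per feature, group by strictly increasing running max day
--     answer = []
--     cur = 0
--     cnt = 0
--     for p, s in zip(progresses, speeds):
--         d = max(1, -((p - 100) // s))
--         if d > cur: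
--             if cnt:
--                 answer.append(cnt)
--             cur = d
--             cnt = 1
--         else:
--             cnt += 1
--     if cnt:
--         answer.append(cnt)
--     return answer
-- ===== Notes on version B (the rewrite author's own statement) =====
-- stated objective: alternative
-- what changed: A simulates the deployment day by day (incrementing every remaining progress each day and popping the finished prefix); B computes each feature's ceiling day count -((p-100)//s) once and groups features in a single pass by the strictly increasing running maximum day.
-- outside the precondition, e.g. on solution([100], [0]): A returns [1], B raises ZeroDivisionError; on solution([150, 150], [-50, -49]): A returns [2], B returns [1, 1]
import Mathlib
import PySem

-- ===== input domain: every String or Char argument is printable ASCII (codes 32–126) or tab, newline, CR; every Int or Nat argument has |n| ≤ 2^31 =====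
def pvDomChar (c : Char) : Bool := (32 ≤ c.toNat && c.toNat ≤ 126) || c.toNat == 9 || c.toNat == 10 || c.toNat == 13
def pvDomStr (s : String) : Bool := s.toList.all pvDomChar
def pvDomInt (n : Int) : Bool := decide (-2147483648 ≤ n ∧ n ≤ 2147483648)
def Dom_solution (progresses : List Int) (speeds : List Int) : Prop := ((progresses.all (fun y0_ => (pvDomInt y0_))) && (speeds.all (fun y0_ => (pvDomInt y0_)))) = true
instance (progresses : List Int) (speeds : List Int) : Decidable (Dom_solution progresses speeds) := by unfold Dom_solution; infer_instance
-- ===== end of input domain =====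

-- B replaces A's day-by-day simulation by a single pass over per-feature ceil-days grouped
-- by the running maximum day (objective: alternative algorithm, one pass over the features
-- instead of one pass per simulated day).

-- ===== PORT A =====
-- ceil((100-p)/s) = -((p-100)//s): the number of days feature (p, s) still needs.
-- A's Python 'while' has no fuel; pvFuel is a sufficient iteration bound (the largest day count).
def pvCeilDay (p s : Int) : Int := -(PySem.Int.floordiv (p - 100) s)

def pvFuel (progresses speeds : List Int) : Nat :=
  ((List.zipWith pvCeilDay progresses speeds).foldl (fun a d => max a d) 1).toNat

-- exact on Pre_ (len speeds ≥ len progresses): 'for i in range(len(progresses)): progresses[i] += speeds[i]'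
-- is zipWith (+); Python raises IndexError when speeds is shorter.
def solutionLoop : Nat → List Int → List Int → List Int → List Int
  | 0, _, _, answer => answer
  | fuel+1, progresses, speeds, answer =>
    match progresses with
    | [] => answer
    | p :: ps =>
      let ps1 := List.zipWith (· + ·) (p :: ps) speeds
      let k := (ps1.takeWhile (fun x => decide ((100:Int) ≤ x))).length
      let answer' := if k ≠ 0 then answer ++ [(k : Int)] else answer
      solutionLoop fuel (ps1.drop k) (speeds.drop k) answer'

def solution (progresses : List Int) (speeds : List Int) : List Int :=
  solutionLoop (pvFuel progresses speeds) progresses speeds []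

-- ===== PORT B =====
def solution_alt (progresses : List Int) (speeds : List Int) : List Int :=
  let st := (progresses.zip speeds).foldl
    (fun (st : List Int × Int × Int) pr =>
      let d := max 1 (-(PySem.Int.floordiv (pr.1 - 100) pr.2))
      if st.2.1 < d then
        ((if st.2.2 ≠ 0 then st.1 ++ [st.2.2] else st.1), d, 1)
      else
        (st.1, st.2.1, st.2.2 + 1))
    ([], 0, 0)
  if st.2.2 ≠ 0 then st.1 ++ [st.2.2] else st.1

-- ===== PRECONDITION & SPEC =====
-- Pre_ restricts to the task's natural domain: at least as many speeds as progresses (A raises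
-- IndexError otherwise) and positive speeds for the entries actually used — with a zero or
-- negative speed A diverges on almost all inputs (and B's ceil division raises
-- ZeroDivisionError for speed 0); the rare returning cases there are outside the problem's domain.
def Pre_solution (progresses : List Int) (speeds : List Int) : Prop :=
  progresses.length ≤ speeds.length ∧ ∀ s ∈ speeds.take progresses.length, 0 < s
instance (progresses : List Int) (speeds : List Int) : Decidable (Pre_solution progresses speeds) := by unfold Pre_solution; infer_instance
def pvWitness_solution : List Int × List Int := ([93, 30, 55], [1, 30, 5])
def Spec_solution (progresses : List Int) (speeds : List Int) (out : List Int) : Prop := out = solution_alt progresses speeds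
instance (progresses : List Int) (speeds : List Int) (out : List Int) : Decidable (Spec_solution progresses speeds out) := by unfold Spec_solution; infer_instance

-- ===== CLAIM (what is proved, stated in full; the proofs are below) =====
def Claim_equal_solution : Prop := ∀ (progresses : List Int) (speeds : List Int), Dom_solution progresses speeds → Pre_solution progresses speeds → Spec_solution progresses speeds (solution progresses speeds)

-- ===== LEMMAS AND PROOFS =====

-- the (unclamped) ceil-day list of a simulation state
def pvDays (ps ss : List Int) : List Int := List.zipWith pvCeilDay ps ss

-- B's grouping loop, list-recursively (cur = pop day of the current group, cnt = its size)
def Ggo (cur cnt : Int) : List Int → List Int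
  | [] => [cnt]
  | d :: t => if cur < d then cnt :: Ggo d 1 t else Ggo cur (cnt + 1) t

def G : List Int → List Int
  | [] => []
  | d :: t => Ggo (max 1 d) 1 t

-- A's simulation abstracted to day lists: each day every remaining count drops by 1,
-- the prefix with day ≤ 1 pops
def simD : Nat → List Int → List Int
  | 0, _ => []
  | _+1, [] => []
  | f+1, d :: t =>
    let k := ((d :: t).takeWhile (fun x => decide (x ≤ (1:Int)))).length
    (if k ≠ 0 then [(k : Int)] else []) ++ simD f (((d :: t).drop k).map (fun x => x - 1))

def Mx (l : List Int) : Int := l.foldl (fun a d => max a d) 1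

def bstep (st : List Int × Int × Int) (d : Int) : List Int × Int × Int :=
  if st.2.1 < d then ((if st.2.2 ≠ 0 then st.1 ++ [st.2.2] else st.1), d, 1)
  else (st.1, st.2.1, st.2.2 + 1)

-- ---- arithmetic facts (0 < s) ----
theorem pv_day_le_one (p s : Int) (hs : 0 < s) : pvCeilDay p s ≤ 1 ↔ 100 ≤ p + s := by
  unfold pvCeilDay
  have h := PySem.Int.le_floordiv_iff_mul_le (q := -1) (a := p - 100) (b := s) hs
  omega

theorem pv_day_step (p s : Int) (hs : 0 < s) : pvCeilDay (p + s) s = pvCeilDay p s - 1 := by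
  unfold pvCeilDay
  rw [PySem.Int.floordiv_eq_ediv_of_pos (a := p + s - 100) hs,
      PySem.Int.floordiv_eq_ediv_of_pos (a := p - 100) hs]
  have h : p + s - 100 = (p - 100) + 1 * s := by ring
  rw [h, Int.add_mul_ediv_right _ _ (by omega : s ≠ 0)]
  ring

-- ---- pointwise facts transported along the zip ----
theorem pv_tw_len : ∀ (ps ss : List Int), (∀ s ∈ ss.take ps.length, 0 < s) →
    ((List.zipWith (· + ·) ps ss).takeWhile (fun x => decide ((100:Int) ≤ x))).length
      = ((pvDays ps ss).takeWhile (fun x => decide (x ≤ (1:Int)))).length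
  | [], _, _ => by simp [pvDays]
  | _ :: _, [], _ => by simp [pvDays]
  | p :: ps, s :: ss, h => by
    have hs : 0 < s := h s (by simp)
    have ht : ∀ x ∈ ss.take ps.length, 0 < x := fun x hx => h x (by simp [hx])
    simp only [pvDays, List.zipWith_cons_cons, List.takeWhile_cons]
    by_cases hc : 100 ≤ p + s
    · have hd : pvCeilDay p s ≤ 1 := (pv_day_le_one p s hs).2 hc
      simpa [hc, hd] using pv_tw_len ps ss ht
    · have hd : ¬ pvCeilDay p s ≤ 1 := fun hh => hc ((pv_day_le_one p s hs).1 hh)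
      simp [hc, hd]

theorem pv_days_step : ∀ (ps ss : List Int), (∀ s ∈ ss.take ps.length, 0 < s) →
    pvDays (List.zipWith (· + ·) ps ss) ss = (pvDays ps ss).map (fun x => x - 1)
  | [], _, _ => by simp [pvDays]
  | _ :: _, [], _ => by simp [pvDays]
  | p :: ps, s :: ss, h => by
    have hs : 0 < s := h s (by simp)
    have ht : ∀ x ∈ ss.take ps.length, 0 < x := fun x hx => h x (by simp [hx])
    simp only [pvDays, List.zipWith_cons_cons, List.map_cons]
    rw [pv_day_step p s hs]
    exact congrArg _ (pv_days_step ps ss ht)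

theorem pv_pos_sub {ss : List Int} {n k m : Nat} (h : ∀ s ∈ ss.take n, 0 < s)
    (hkm : k + m ≤ n) : ∀ s ∈ (ss.drop k).take m, 0 < s := by
  intro s hs
  have h1 : (ss.take (k + m)).drop k = (ss.drop k).take m := by
    rw [List.drop_take]
    congr 1
    omega
  rw [← h1] at hs
  have h2 : s ∈ ss.take (k + m) := List.mem_of_mem_drop hs
  have h3 : ss.take (k + m) = (ss.take n).take (k + m) := by
    rw [List.take_take, min_eq_left hkm]
  rw [h3] at h2
  exact h s (List.mem_of_mem_take h2)

theorem pv_loop_nil : ∀ (f : Nat) (ss ans : List Int), solutionLoop f [] ss ans = ans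
  | 0, _, _ => rfl
  | _+1, _, _ => rfl

theorem pv_simD_nil : ∀ f, simD f [] = []
  | 0 => rfl
  | _+1 => rfl

-- ---- A's loop equals the day-list simulation ----
theorem pv_L1 : ∀ (f : Nat) (ps ss ans : List Int), (∀ s ∈ ss.take ps.length, 0 < s) →
    solutionLoop f ps ss ans = ans ++ simD f (pvDays ps ss) := by
  intro f
  induction f with
  | zero => intro ps ss ans _; simp [solutionLoop, simD]
  | succ f ih =>
    intro ps ss ans h
    match ps, ss with
    | [], ss => simp [solutionLoop, pvDays, pv_simD_nil]
    | p :: pt, [] =>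
      simp [solutionLoop, pvDays, pv_simD_nil, pv_loop_nil]
    | p :: pt, s :: st =>
      have hds : pvDays (p :: pt) (s :: st) = pvCeilDay p s :: pvDays pt st := by
        simp [pvDays]
      have hk := pv_tw_len (p :: pt) (s :: st) h
      simp only [solutionLoop]
      set ps1 := List.zipWith (· + ·) (p :: pt) (s :: st) with hps1
      set k := (ps1.takeWhile (fun x => decide ((100:Int) ≤ x))).length with hkdef
      have hkle : k ≤ ps1.length := by
        rw [hkdef]; exact (List.takeWhile_prefix _).length_le
      have hlen1 : ps1.length ≤ (p :: pt).length := by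
        rw [hps1]; simp
      have hpos' : ∀ x ∈ ((s :: st).drop k).take (ps1.drop k).length, 0 < x := by
        apply pv_pos_sub h
        simp only [List.length_drop]
        omega
      rw [ih (ps1.drop k) ((s :: st).drop k) _ hpos']
      have hdays : pvDays (ps1.drop k) ((s :: st).drop k)
          = ((pvDays (p :: pt) (s :: st)).drop k).map (fun x => x - 1) := by
        unfold pvDays
        rw [← List.drop_zipWith]
        show (pvDays ps1 (s :: st)).drop k = _
        rw [hps1, pv_days_step (p :: pt) (s :: st) h]
        rw [List.map_drop]
        rfl
      rw [hdays]
      conv_rhs => rw [hds]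
      simp only [simD]
      rw [← hds, ← hk]
      by_cases h0 : k = 0
      · simp [h0]
      · simp [h0, List.append_assoc]

-- ---- Ggo bookkeeping ----
theorem pv_Ggo_all : ∀ (t : List Int) (cur cnt : Int), (∀ d ∈ t, d ≤ cur) →
    Ggo cur cnt t = [cnt + t.length]
  | [], cur, cnt, _ => by simp [Ggo]
  | d :: t, cur, cnt, h => by
    have hd : ¬ cur < d := by have := h d (by simp); omega
    rw [Ggo, if_neg hd, pv_Ggo_all t cur (cnt + 1) (fun x hx => h x (by simp [hx]))]
    congr 1
    simp
    ring

theorem pv_Ggo_break : ∀ (t1 : List Int) (d' : Int) (t2 : List Int) (cur cnt : Int),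
    (∀ d ∈ t1, d ≤ cur) → cur < d' →
    Ggo cur cnt (t1 ++ d' :: t2) = (cnt + t1.length) :: Ggo d' 1 t2
  | [], d', t2, cur, cnt, _, hlt => by simp [Ggo, hlt]
  | d :: t1, d', t2, cur, cnt, h, hlt => by
    have hd : ¬ cur < d := by have := h d (by simp); omega
    rw [List.cons_append, Ggo, if_neg hd,
        pv_Ggo_break t1 d' t2 cur (cnt + 1) (fun x hx => h x (by simp [hx])) hlt]
    congr 1
    simp
    ring

theorem pv_Ggo_shift : ∀ (t : List Int) (cur cnt : Int),
    Ggo (cur - 1) cnt (t.map (fun x => x - 1)) = Ggo cur cnt t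
  | [], _, _ => rfl
  | d :: t, cur, cnt => by
    simp only [List.map_cons, Ggo]
    by_cases hc : cur < d
    · rw [if_pos (by omega : cur - 1 < d - 1), if_pos hc]
      exact congrArg _ (pv_Ggo_shift t d 1)
    · rw [if_neg (by omega : ¬ cur - 1 < d - 1), if_neg hc]
      exact pv_Ggo_shift t cur (cnt + 1)

theorem pv_Ggo_clamp : ∀ (t : List Int) (cur cnt : Int), 1 ≤ cur →
    Ggo cur cnt (t.map (fun x => max 1 x)) = Ggo cur cnt t
  | [], _, _, _ => rfl
  | d :: t, cur, cnt, h1 => by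
    simp only [List.map_cons, Ggo]
    by_cases hc : cur < d
    · rw [if_pos (by omega : cur < max 1 d), if_pos hc, (by omega : max 1 d = d)]
      exact congrArg _ (pv_Ggo_clamp t d 1 (by omega))
    · rw [if_neg (by omega : ¬ cur < max 1 d), if_neg hc]
      exact pv_Ggo_clamp t cur (cnt + 1) h1

-- ---- foldl-max bookkeeping ----
theorem pv_le_Mx_init : ∀ (l : List Int) (a : Int), a ≤ l.foldl (fun x y => max x y) a
  | [], a => le_refl a
  | d :: t, a => le_trans (le_max_left a d) (pv_le_Mx_init t _)

theorem pv_mem_le_Mx : ∀ (l : List Int) (a : Int), ∀ d ∈ l, d ≤ l.foldl (fun x y => max x y) a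
  | [], _, x, hx => absurd hx (by simp)
  | d :: t, a, x, hx => by
    rcases List.mem_cons.1 hx with rfl | hx'
    · exact le_trans (le_max_right a x) (pv_le_Mx_init t _)
    · exact pv_mem_le_Mx t _ x hx'

theorem pv_Mx_le : ∀ (l : List Int) (a c : Int), a ≤ c → (∀ d ∈ l, d ≤ c) →
    l.foldl (fun x y => max x y) a ≤ c
  | [], _, _, ha, _ => ha
  | d :: t, a, c, ha, h =>
    pv_Mx_le t _ c (max_le ha (h d (by simp))) (fun x hx => h x (by simp [hx]))

theorem pv_dw_head : ∀ (p : Int → Bool) (l : List Int) (d' : Int) (t2 : List Int),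
    l.dropWhile p = d' :: t2 → p d' = false
  | p, [], d', t2, h => by simp [List.dropWhile] at h
  | p, x :: l, d', t2, h => by
    rw [List.dropWhile_cons] at h
    by_cases hx : p x = true
    · rw [if_pos hx] at h; exact pv_dw_head p l d' t2 h
    · rw [if_neg hx] at h
      cases h
      simpa using hx

theorem pv_tw_drop : ∀ (p : Int → Bool) (l : List Int),
    l.drop (l.takeWhile p).length = l.dropWhile p
  | p, [] => rfl
  | p, x :: l => by
    rw [List.takeWhile_cons, List.dropWhile_cons]
    by_cases hx : p x = true
    · rw [if_pos hx, if_pos hx]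
      simpa using pv_tw_drop p l
    · rw [if_neg hx, if_neg hx]
      simp

-- ---- the day-list simulation equals B's grouping ----
theorem pv_L2 : ∀ (f : Nat) (ds : List Int), Mx ds ≤ (f : Int) → simD f ds = G ds := by
  intro f
  induction f with
  | zero =>
    intro ds h
    cases ds with
    | nil => rfl
    | cons d t =>
      exfalso
      have h1 : (1:Int) ≤ Mx (d :: t) := pv_le_Mx_init (d :: t) 1
      have h0 : Mx (d :: t) ≤ 0 := by exact_mod_cast h
      omega
  | succ f ih =>
    intro ds h
    have hcast : ((f + 1 : Nat) : Int) = (f : Int) + 1 := by push_cast; ring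
    rw [hcast] at h
    cases ds with
    | nil => rfl
    | cons d t =>
      have hMx : ∀ x ∈ d :: t, x ≤ Mx (d :: t) := pv_mem_le_Mx (d :: t) 1
      by_cases hd : d ≤ (1:Int)
      · -- the head pops this day, together with the ≤1 prefix behind it
        have hdt : (fun x => decide (x ≤ (1:Int))) d = true := by simp [hd]
        set t1 := t.takeWhile (fun x => decide (x ≤ (1:Int))) with ht1
        have hk : ((d :: t).takeWhile (fun x => decide (x ≤ (1:Int)))).length = t1.length + 1 := by
          rw [List.takeWhile_cons, if_pos hdt]
          simp [ht1]
        have ht1le : ∀ x ∈ t1, x ≤ (1:Int) := by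
          intro x hx
          have := List.mem_takeWhile_imp hx
          simpa using this
        have hsplit : t1 ++ t.dropWhile (fun x => decide (x ≤ (1:Int))) = t := by
          rw [ht1]; exact List.takeWhile_append_dropWhile
        simp only [simD]
        rw [hk, if_pos (by omega : t1.length + 1 ≠ 0)]
        have hdrop : (d :: t).drop (t1.length + 1) = t.dropWhile (fun x => decide (x ≤ (1:Int))) := by
          rw [List.drop_succ_cons, ht1]
          exact pv_tw_drop _ t
        rw [hdrop]
        cases hrest : t.dropWhile (fun x => decide (x ≤ (1:Int))) with
        | nil =>
          have ht : t = t1 := by rw [← hsplit, hrest, List.append_nil]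
          rw [List.map_nil, pv_simD_nil, List.append_nil]
          simp only [G]
          rw [(by omega : max 1 d = 1),
              pv_Ggo_all t 1 1 (by rw [ht]; exact ht1le)]
          have hlt : t.length = t1.length := by rw [ht]
          simp [hlt]
          ring
        | cons d' t2 =>
          have hd' : ¬ d' ≤ (1:Int) := by simpa using pv_dw_head _ t d' t2 hrest
          have hmem : ∀ x ∈ d' :: t2, x ∈ d :: t := by
            intro x hx
            exact List.mem_cons_of_mem d (by rw [← hsplit, hrest]; exact List.mem_append_right t1 hx)
          have hd'le : d' ≤ Mx (d :: t) := hMx d' (hmem d' (by simp))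
          have hMf : Mx ((d' :: t2).map (fun x => x - 1)) ≤ (f : Int) := by
            apply pv_Mx_le
            · omega
            · intro y hy
              obtain ⟨x, hx, rfl⟩ := List.mem_map.1 hy
              have hxle := hMx x (hmem x hx)
              omega
          rw [ih _ hMf]
          have hGmap : G ((d' :: t2).map (fun x => x - 1)) = Ggo d' 1 t2 := by
            simp only [List.map_cons, G]
            rw [(by omega : max 1 (d' - 1) = d' - 1)]
            exact pv_Ggo_shift t2 d' 1
          rw [hGmap]
          simp only [G]
          rw [(by omega : max 1 d = 1),
              (by rw [← hsplit, hrest] : t = t1 ++ d' :: t2)]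
          rw [pv_Ggo_break t1 d' t2 1 1 ht1le (by omega)]
          simp
          ring
      · -- nothing pops this day
        have hdt : (fun x => decide (x ≤ (1:Int))) d = false := by simp [hd]
        have hk0 : ((d :: t).takeWhile (fun x => decide (x ≤ (1:Int)))).length = 0 := by
          rw [List.takeWhile_cons, if_neg (by simp [hd])]
          rfl
        simp only [simD]
        rw [hk0, if_neg (by omega : ¬ (0:Nat) ≠ 0), List.drop_zero, List.nil_append]
        have hdle : d ≤ Mx (d :: t) := hMx d (by simp)
        have hMf : Mx ((d :: t).map (fun x => x - 1)) ≤ (f : Int) := by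
          apply pv_Mx_le
          · omega
          · intro y hy
            obtain ⟨x, hx, rfl⟩ := List.mem_map.1 hy
            have hxle := hMx x hx
            omega
        rw [ih _ hMf]
        simp only [List.map_cons, G]
        rw [(by omega : max 1 (d - 1) = d - 1), pv_Ggo_shift t d 1,
            (by omega : max 1 d = d)]

-- ---- B's port equals the grouping G ----
theorem pv_fold_zip : ∀ (l : List (Int × Int)) (st : List Int × Int × Int),
    l.foldl
      (fun (st : List Int × Int × Int) pr =>
        let d := max 1 (-(PySem.Int.floordiv (pr.1 - 100) pr.2))
        if st.2.1 < d then
          ((if st.2.2 ≠ 0 then st.1 ++ [st.2.2] else st.1), d, 1)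
        else
          (st.1, st.2.1, st.2.2 + 1)) st
      = (l.map (fun pr => max 1 (pvCeilDay pr.1 pr.2))).foldl bstep st
  | [], _ => rfl
  | x :: l, st => by
    simp only [List.foldl_cons, List.map_cons]
    exact pv_fold_zip l _

theorem pv_zip_days : ∀ (ps ss : List Int),
    (ps.zip ss).map (fun pr => max 1 (pvCeilDay pr.1 pr.2)) = (pvDays ps ss).map (fun x => max 1 x)
  | [], _ => by simp [pvDays]
  | _ :: _, [] => by simp [pvDays]
  | p :: pt, s :: st => by
    simp only [List.zip_cons_cons, List.map_cons, pvDays, List.zipWith_cons_cons]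
    exact congrArg _ (pv_zip_days pt st)

theorem pv_B_fold : ∀ (t : List Int) (ans : List Int) (cur cnt : Int), 1 ≤ cur → 1 ≤ cnt →
    (match t.foldl bstep (ans, cur, cnt) with
     | st => if st.2.2 ≠ 0 then st.1 ++ [st.2.2] else st.1) = ans ++ Ggo cur cnt t
  | [], ans, cur, cnt, _, hcnt => by
    simp only [List.foldl_nil, Ggo]
    rw [if_pos (by omega : cnt ≠ 0)]
  | d :: t, ans, cur, cnt, hcur, hcnt => by
    simp only [List.foldl_cons, bstep, Ggo]
    by_cases hc : cur < d
    · rw [if_pos hc, if_pos hc, if_pos (by omega : cnt ≠ 0)]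
      rw [pv_B_fold t (ans ++ [cnt]) d 1 (by omega) (by omega)]
      simp [List.append_assoc]
    · rw [if_neg hc, if_neg hc]
      exact pv_B_fold t ans cur (cnt + 1) hcur (by omega)

theorem pv_B_eq_G : ∀ (ps ss : List Int), solution_alt ps ss = G (pvDays ps ss) := by
  intro ps ss
  unfold solution_alt
  rw [pv_fold_zip, pv_zip_days]
  cases hds : pvDays ps ss with
  | nil => simp [G]
  | cons d t =>
    simp only [List.map_cons, List.foldl_cons, bstep]
    have h1 : (0:Int) < max 1 d := by have := le_max_left (1:Int) d; omega
    rw [if_pos h1, if_neg (by omega : ¬ ((0:Int) ≠ 0))]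
    have hfl := pv_B_fold (t.map (fun x => max 1 x)) [] (max 1 d) 1 (le_max_left 1 d) le_rfl
    simp only at hfl
    rw [hfl, List.nil_append, pv_Ggo_clamp t (max 1 d) 1 (le_max_left 1 d)]
    simp [G]

-- ===== VERDICT (by name: the statement is the Claim_ definition above) =====
theorem solution_spec : Claim_equal_solution := by
  intro ps ss _ hpre
  obtain ⟨hlen, hpos⟩ := hpre
  unfold Spec_solution solution
  rw [pv_L1 (pvFuel ps ss) ps ss [] hpos, List.nil_append]
  have hfuel : pvFuel ps ss = (Mx (pvDays ps ss)).toNat := rfl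
  rw [pv_L2 (pvFuel ps ss) (pvDays ps ss) (by rw [hfuel]; exact Int.self_le_toNat _)]
  rw [pv_B_eq_G]
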